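-- pv_equiv track=rewrite | github.com/n-toscano/AoC | 2024/day14/14a.py | update_pos
-- ===== SOURCE A (Python) =====
-- n_rows = 101
--
-- n_cols = 103
--
-- def update_pos(pos, vel, i=0):
--     while i < 100:
--         new_pos_x = (pos[0] + vel[0]) % n_rows
--         new_pos_y = (pos[1] + vel[1]) % n_cols
--         new_pos = (new_pos_x, new_pos_y)
--         i += 1
--         return update_pos(new_pos, vel, i)
--     return pos
-- ===== SOURCE B (Python) =====
-- n_rows = 101
--
-- n_cols = 103
--
-- def update_pos(pos, vel, i=0):
--     if i >= 100:
--         return pos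
--     n = 100 - i
--     return tuple((p + n * v) % m for p, v, m in zip(pos, vel, (n_rows, n_cols)))
-- ===== Notes on version B (the rewrite author's own statement) =====
-- stated objective: simpler
-- what changed: Replaces the 100-step tail recursion (one modular step per call) with a single closed-form pass that zips positions, velocities and the bounds (n_rows, n_cols) and computes (p + (100-i)*v) % m once per coordinate; the constant-step saving was not measurably faster in a timing run, so no speed is claimed.
-- outside the precondition, e.g. on update_pos((1, 2), (3, 4), -850): A returns (23, 94), B returns (23, 94)
import Mathlib
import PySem

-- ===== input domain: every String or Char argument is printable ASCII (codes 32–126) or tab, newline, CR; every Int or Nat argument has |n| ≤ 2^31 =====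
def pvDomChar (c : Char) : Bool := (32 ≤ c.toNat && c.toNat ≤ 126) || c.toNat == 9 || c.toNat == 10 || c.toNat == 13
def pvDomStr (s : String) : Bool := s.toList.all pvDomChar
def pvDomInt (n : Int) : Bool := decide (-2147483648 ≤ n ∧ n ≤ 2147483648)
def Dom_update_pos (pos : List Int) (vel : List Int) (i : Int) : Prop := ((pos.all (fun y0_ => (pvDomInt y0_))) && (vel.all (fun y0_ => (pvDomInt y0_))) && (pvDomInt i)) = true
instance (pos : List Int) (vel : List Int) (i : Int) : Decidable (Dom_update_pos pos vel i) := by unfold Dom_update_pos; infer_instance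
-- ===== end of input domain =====

-- B replaces A's 100-step tail recursion by one zip-and-map pass computing the closed form (p + (100-i)*v) % m per coordinate (objective: simpler; not measured faster).


-- ===== PORT A =====
-- literal transliteration of A: the 'while' with an unconditional 'return' inside is one
-- recursive step per call; pos[k]/vel[k] via pyGet? (Pre_ keeps the IndexError inputs out).
def update_pos (pos : List Int) (vel : List Int) (i : Int) : List Int :=
  if _h : i < 100 then
    let new_pos_x := PySem.Int.mod (((PySem.List.pyGet? pos 0).getD 0) + ((PySem.List.pyGet? vel 0).getD 0)) 101
    let new_pos_y := PySem.Int.mod (((PySem.List.pyGet? pos 1).getD 0) + ((PySem.List.pyGet? vel 1).getD 0)) 103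
    update_pos [new_pos_x, new_pos_y] vel (i + 1)
  else pos
termination_by (100 - i).toNat
decreasing_by omega

-- ===== PORT B =====
-- transliteration of B: zip(pos, vel, (n_rows, n_cols)) then one map computing (p + n*v) % m.
def update_pos_alt (pos : List Int) (vel : List Int) (i : Int) : List Int :=
  if 100 ≤ i then pos
  else
    let n := 100 - i
    (pos.zip (vel.zip [(101 : Int), 103])).map
      (fun pvm => PySem.Int.mod (pvm.1 + n * pvm.2.1) pvm.2.2)

-- ===== PRECONDITION & SPEC =====
-- Pre_ excludes (a) i < 100 with pos or vel shorter than 2, where A raises IndexError, and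
-- (b) i < -800, where A's recursion depth 100 - i approaches/exceeds Python's default
-- recursion limit and A raises RecursionError (observed from about i ≤ -896; the exact
-- threshold is an interpreter artifact, so a safe margin is excluded — for i in the small
-- margin band A still returns and agrees with B, see the cite in claim.json).
def Pre_update_pos (pos : List Int) (vel : List Int) (i : Int) : Prop :=
  -800 ≤ i ∧ (100 ≤ i ∨ (2 ≤ pos.length ∧ 2 ≤ vel.length))
instance (pos : List Int) (vel : List Int) (i : Int) : Decidable (Pre_update_pos pos vel i) := by
  unfold Pre_update_pos; infer_instance
def pvWitness_update_pos : List Int × List Int × Int := ([3, 5], [7, -11], 0)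

def Spec_update_pos (pos : List Int) (vel : List Int) (i : Int) (out : List Int) : Prop := out = update_pos_alt pos vel i
instance (pos : List Int) (vel : List Int) (i : Int) (out : List Int) : Decidable (Spec_update_pos pos vel i out) := by unfold Spec_update_pos; infer_instance

-- ===== CLAIM (what is proved, stated in full; the proofs are below) =====
def Claim_equal_update_pos : Prop := ∀ (pos : List Int) (vel : List Int) (i : Int), Dom_update_pos pos vel i → Pre_update_pos pos vel i → Spec_update_pos pos vel i (update_pos pos vel i)

-- ===== LEMMAS AND PROOFS =====

-- proof-only closed form: B's per-coordinate formula expressed through pyGet?, used as a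
-- bridge between A's recursion and B's zip-and-map pass
def altCF (pos : List Int) (vel : List Int) (i : Int) : List Int :=
  if 100 ≤ i then pos
  else
    let n := 100 - i
    [PySem.Int.mod (((PySem.List.pyGet? pos 0).getD 0) + n * ((PySem.List.pyGet? vel 0).getD 0)) 101,
     PySem.Int.mod (((PySem.List.pyGet? pos 1).getD 0) + n * ((PySem.List.pyGet? vel 1).getD 0)) 103]

lemma g0 (a b : Int) (r : List Int) : PySem.List.pyGet? (a :: b :: r) 0 = some a := by
  simp [PySem.List.pyGet?, PySem.List.pyIdx?, if_pos (show (0:Int) ≤ (r.length:Int) + 1 by omega)]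

lemma g1 (a b : Int) (r : List Int) : PySem.List.pyGet? (a :: b :: r) 1 = some b := by
  simp [PySem.List.pyGet?, PySem.List.pyIdx?, if_pos (show (1:Int) ≤ (r.length:Int) + 1 by omega)]

-- B's zip-and-map pass computes the bridge closed form on lists of length ≥ 2
lemma alt_eq_altCF (a b : Int) (r : List Int) (c d : Int) (s : List Int) (i : Int) :
    update_pos_alt (a :: b :: r) (c :: d :: s) i = altCF (a :: b :: r) (c :: d :: s) i := by
  by_cases h : 100 ≤ i
  · simp [update_pos_alt, altCF, h]
  · simp [update_pos_alt, altCF, h, List.zip]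

-- one closed-form step absorbed: the bridge at i equals the bridge at i+1 applied to A's one-step update
lemma altCF_step (pos vel : List Int) (i : Int) (hi : i < 100) :
    altCF pos vel i =
      altCF
        [PySem.Int.mod (((PySem.List.pyGet? pos 0).getD 0) + ((PySem.List.pyGet? vel 0).getD 0)) 101,
         PySem.Int.mod (((PySem.List.pyGet? pos 1).getD 0) + ((PySem.List.pyGet? vel 1).getD 0)) 103]
        vel (i + 1) := by
  have m101 : ∀ a : Int, PySem.Int.mod a 101 = a % 101 := fun a => PySem.Int.mod_eq_emod_of_pos (by norm_num)
  have m103 : ∀ a : Int, PySem.Int.mod a 103 = a % 103 := fun a => PySem.Int.mod_eq_emod_of_pos (by norm_num)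
  simp only [altCF, if_neg (show ¬ (100 ≤ i) by omega)]
  by_cases h99 : 100 ≤ i + 1
  · rw [if_pos h99]
    have : i = 99 := by omega
    subst this
    norm_num
  · rw [if_neg h99]
    simp only [g0, g1, Option.getD_some, m101, m103, List.cons.injEq, and_true]
    refine ⟨?_, ?_⟩ <;> (rw [Int.emod_add_emod]; congr 1; ring)

lemma main_lemma (n : Nat) : ∀ (pos vel : List Int) (i : Int), (100 - i).toNat = n →
    2 ≤ vel.length →
    update_pos pos vel i = altCF pos vel i := by
  induction n with
  | zero =>
    intro pos vel i hn hv
    rw [update_pos, dif_neg (show ¬ i < 100 by omega)]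
    rw [altCF, if_pos (show (100:Int) ≤ i by omega)]
  | succ k ih =>
    intro pos vel i hn hv
    have hi : i < 100 := by omega
    rw [update_pos, dif_pos hi]
    rw [ih _ vel (i + 1) (by omega) hv]
    exact (altCF_step pos vel i hi).symm

-- ===== VERDICT (by name: the statement is the Claim_ definition above) =====
theorem update_pos_spec : Claim_equal_update_pos := by
  intro pos vel i _ hpre
  unfold Spec_update_pos
  rcases hpre with ⟨_, h100 | ⟨hp, hv⟩⟩
  · rw [update_pos, dif_neg (show ¬ i < 100 by omega)]
    rw [update_pos_alt, if_pos h100]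
  · match pos, hp, vel, hv with
    | a :: b :: r, _, c :: d :: s, _ =>
      rw [main_lemma (100 - i).toNat _ _ i rfl (by simp)]
      exact (alt_eq_altCF a b r c d s i).symm
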